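-- pv_equiv track=rewrite | github.com/jaumeollerfernandez/Useful-Tools-in-Python | Cloud. AWS Lambda functions/ExcelToJSON/obtainCSVvalues.py | obtainCSVvalues
-- ===== SOURCE A (Python) =====
-- def obtainCSVvalues(pCSV):
--     csv = pCSV
--     aux = []
--     aux2 = []
--     M = []
--     i = 0
--     bol = False
--     while i < len(csv):
--
--         if ord(csv[i]) >= 65 and ord(csv[i]) <=90:
--             bol = True
--
--         if ord(csv[i]) != 59 and bol == True and csv[i] != "\r":
--             if ord(csv[i]) == 44:
--                 aux.append(",")
--             else:
--                 aux.append(csv[i])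
--
--         if ord(csv[i]) == 59 and bol == True or csv[i] == "\r":
--
--                 string = "".join(aux)
--                 aux2.append(string)
--                 aux = []
--
--         if ord(csv[i]) == 92 and aux != []:
--                 string = "".join(aux)
--                 aux2.append(string)
--                 aux = []
--
--         if csv[i] == "\r":
--             if aux2 != []:
--                 M.append(aux2)
--                 aux2 = []
--                 bol = False
--
--         i+=1
--
--     return M
-- ===== SOURCE B (Python) =====
-- def _parseRow(row):
--     fields = []
--     buf = []
--     active = False
--     for c in row:
--         if 'A' <= c <= 'Z':
--             active = True
--         if active:
--             if c == ';':
--                 fields.append(''.join(buf))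
--                 buf = []
--             else:
--                 buf.append(c)
--                 if c == '\\':
--                     fields.append(''.join(buf))
--                     buf = []
--     fields.append(''.join(buf))
--     return fields
--
--
-- def obtainCSVvalues(pCSV):
--     parts = pCSV.split('\r')
--     return [_parseRow(seg) for seg in parts[:-1]]
-- ===== Notes on version B (the rewrite author's own statement) =====
-- stated objective: simpler
-- what changed: B replaces A's single monolithic while-loop with four pieces of mutable cross-row state by a split('\r') into row segments plus a small per-row field parser, dropping the unterminated trailing segment explicitly.
import Mathlib
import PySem

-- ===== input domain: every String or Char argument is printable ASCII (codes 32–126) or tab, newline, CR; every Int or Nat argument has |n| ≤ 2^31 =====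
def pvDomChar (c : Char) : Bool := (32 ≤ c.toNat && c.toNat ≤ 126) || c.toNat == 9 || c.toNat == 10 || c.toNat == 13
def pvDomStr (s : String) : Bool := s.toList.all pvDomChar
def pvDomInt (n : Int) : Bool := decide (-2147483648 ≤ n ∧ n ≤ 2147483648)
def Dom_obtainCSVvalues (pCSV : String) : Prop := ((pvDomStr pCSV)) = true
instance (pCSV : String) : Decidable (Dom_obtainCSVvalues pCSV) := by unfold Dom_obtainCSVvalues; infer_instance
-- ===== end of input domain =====

-- B restructures A: split on '\r' into row segments, then a small per-row field parser; same result, no cross-row mutable state.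

-- ===== PORT A =====
-- one iteration of A's while-loop body; state = (aux, aux2, M, bol)
def obtainCSVvalues_step (st : List Char × List String × List (List String) × Bool) (c : Char) :
    List Char × List String × List (List String) × Bool :=
  let aux := st.1; let aux2 := st.2.1; let M := st.2.2.1; let bol := st.2.2.2
  let bol := if 65 ≤ c.toNat ∧ c.toNat ≤ 90 then true else bol
  let aux := if c.toNat ≠ 59 ∧ bol = true ∧ c ≠ '\r' then
      (if c.toNat = 44 then aux ++ [','] else aux ++ [c]) else aux
  let p := if (c.toNat = 59 ∧ bol = true) ∨ c = '\r' then
      (([] : List Char), aux2 ++ [String.ofList aux]) else (aux, aux2)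
  let aux := p.1; let aux2 := p.2
  let q := if c.toNat = 92 ∧ aux ≠ [] then
      (([] : List Char), aux2 ++ [String.ofList aux]) else (aux, aux2)
  let aux := q.1; let aux2 := q.2
  let r := if c = '\r' then
      (if aux2 ≠ [] then (([] : List String), M ++ [aux2], false) else (aux2, M, bol))
    else (aux2, M, bol)
  (aux, r)

def obtainCSVvalues (pCSV : String) : List (List String) :=
  (pCSV.toList.foldl obtainCSVvalues_step ([], [], [], false)).2.2.1

-- ===== PORT B =====
-- one char of B's per-row parser; state = (fields, buf, active)
def parseRowStep (st : List String × List Char × Bool) (c : Char) : List String × List Char × Bool :=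
  let fields := st.1; let buf := st.2.1; let active := st.2.2
  let active := if 'A' ≤ c ∧ c ≤ 'Z' then true else active
  if active then
    if c = ';' then (fields ++ [String.ofList buf], [], active)
    else
      let buf := buf ++ [c]
      if c = '\\' then (fields ++ [String.ofList buf], [], active)
      else (fields, buf, active)
  else (fields, buf, active)

def parseRow (row : List Char) : List String :=
  let st := row.foldl parseRowStep ([], [], false)
  st.1 ++ [String.ofList st.2.1]

def obtainCSVvalues_alt (pCSV : String) : List (List String) :=
  let parts := PySem.Chars.splitOn pCSV.toList ['\r']
  parts.dropLast.map parseRow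

-- ===== PRECONDITION & SPEC =====
def Spec_obtainCSVvalues (pCSV : String) (out : List (List String)) : Prop := out = obtainCSVvalues_alt pCSV
instance (pCSV : String) (out : List (List String)) : Decidable (Spec_obtainCSVvalues pCSV out) := by unfold Spec_obtainCSVvalues; infer_instance

-- ===== CLAIM (what is proved, stated in full; the proofs are below) =====
def Claim_equal_obtainCSVvalues : Prop := ∀ (pCSV : String), Dom_obtainCSVvalues pCSV → Spec_obtainCSVvalues pCSV (obtainCSVvalues pCSV)

-- ===== LEMMAS AND PROOFS =====

-- simple recursive split on '\r' (proof-side model of Chars.splitOn _ ['\r'])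
def mySplit : List Char → List (List Char)
  | [] => [[]]
  | c :: rest => if c = '\r' then [] :: mySplit rest else (mySplit rest).modifyHead (c :: ·)

theorem mySplit_ne_nil (cs : List Char) : mySplit cs ≠ [] := by
  induction cs with
  | nil => simp [mySplit]
  | cons c rest ih =>
    simp only [mySplit]
    split
    · simp
    · cases h : mySplit rest with
      | nil => exact absurd h ih
      | cons x t => simp [List.modifyHead]

theorem splitOn_go_cr (fuel : Nat) : ∀ (l cur : List Char) (acc : List (List Char)),
    l.length < fuel →
    PySem.Chars.splitOn.go ['\r'] fuel l cur acc
      = acc.reverse ++ (mySplit l).modifyHead (cur.reverse ++ ·) := by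
  induction fuel with
  | zero => intro l cur acc h; omega
  | succ fuel ih =>
    intro l cur acc h
    cases l with
    | nil =>
      simp [PySem.Chars.splitOn.go, mySplit]
    | cons c rest =>
      simp only [PySem.Chars.splitOn.go]
      by_cases hc : c = '\r'
      · subst hc
        have hpre : (['\r'] : List Char).isPrefixOf ('\r' :: rest) = true := by
          simp [List.isPrefixOf]
        rw [if_pos hpre]
        rw [show List.drop (['\r'] : List Char).length ('\r' :: rest) = rest from rfl]
        rw [ih rest [] ((cur.reverse :: acc)) (by simp at h ⊢; omega)]
        simp only [mySplit]
        cases hms : mySplit rest with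
        | nil => exact absurd hms (mySplit_ne_nil rest)
        | cons x t => simp [List.modifyHead]
      · have hpre : (['\r'] : List Char).isPrefixOf (c :: rest) = false := by
          simp [List.isPrefixOf]
          intro hc'; exact hc hc'.symm
        rw [if_neg (by simp [hpre])]
        rw [ih rest (c :: cur) acc (by simp at h ⊢; omega)]
        simp only [mySplit, if_neg hc]
        cases hms : mySplit rest with
        | nil => exact absurd hms (mySplit_ne_nil rest)
        | cons x t => simp [List.modifyHead]

theorem splitOn_cr (cs : List Char) :
    PySem.Chars.splitOn cs ['\r'] = mySplit cs := by
  have h := splitOn_go_cr (cs.length + 1) cs [] [] (by omega)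
  rw [PySem.Chars.splitOn, h]
  cases hms : mySplit cs with
  | nil => exact absurd hms (mySplit_ne_nil cs)
  | cons x t => simp [List.modifyHead]

-- B's generalized per-character row processor
def goB : List Char → List String → List Char → Bool → List (List String)
  | [], _, _, _ => []
  | c :: rest, fields, buf, active =>
    if c = '\r' then (fields ++ [String.ofList buf]) :: goB rest [] [] false
    else
      let st := parseRowStep (fields, buf, active) c
      goB rest st.1 st.2.1 st.2.2

def parseRowAux (row : List Char) (st : List String × List Char × Bool) : List String :=
  let st' := row.foldl parseRowStep st
  st'.1 ++ [String.ofList st'.2.1]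

theorem parseRow_eq_aux (row : List Char) : parseRow row = parseRowAux row ([], [], false) := rfl

theorem goB_eq (cs : List Char) : ∀ (f : List String) (b : List Char) (a : Bool),
    goB cs f b a =
      match (mySplit cs).dropLast with
      | [] => []
      | seg :: segs => parseRowAux seg (f, b, a) :: segs.map parseRow := by
  induction cs with
  | nil => intro f b a; simp [goB, mySplit]
  | cons c rest ih =>
    intro f b a
    by_cases hc : c = '\r'
    · subst hc
      simp only [goB, mySplit, ih, if_true]
      cases hms : mySplit rest with
      | nil => exact absurd hms (mySplit_ne_nil rest)
      | cons x t =>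
        rw [List.dropLast_cons_of_ne_nil (List.cons_ne_nil x t)]
        cases hdl : (x :: t).dropLast with
        | nil => simp [parseRowAux]
        | cons y u => simp [parseRowAux, parseRow_eq_aux]
    · simp only [goB, if_neg hc, mySplit, ih]
      cases hms : mySplit rest with
      | nil => exact absurd hms (mySplit_ne_nil rest)
      | cons x t =>
        cases t with
        | nil => simp [List.modifyHead]
        | cons z t' =>
          simp only [List.modifyHead]
          rw [List.dropLast_cons_of_ne_nil (List.cons_ne_nil z t'),
              List.dropLast_cons_of_ne_nil (List.cons_ne_nil z t')]
          simp [parseRowAux, List.foldl_cons]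

theorem alt_eq_goB (pCSV : String) :
    obtainCSVvalues_alt pCSV = goB pCSV.toList [] [] false := by
  rw [goB_eq]
  simp only [obtainCSVvalues_alt, splitOn_cr]
  cases hdl : (mySplit pCSV.toList).dropLast with
  | nil => simp
  | cons seg segs => simp [parseRow_eq_aux]

-- char facts used by the step correspondence
theorem char_toNat_inj {c d : Char} (h : c.toNat = d.toNat) : c = d :=
  Char.ext (UInt32.toNat_inj.mp h)

theorem upper_iff (c : Char) : ('A' ≤ c ∧ c ≤ 'Z') ↔ (65 ≤ c.toNat ∧ c.toNat ≤ 90) := by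
  rw [Char.le_def, Char.le_def, UInt32.le_iff_toNat_le, UInt32.le_iff_toNat_le]
  exact Iff.rfl

-- A's loop body agrees with B's per-row step (c ≠ CR), under the invariant bol = false → aux = []
theorem stepA_eq_parseRowStep (c : Char) (hc : c ≠ '\r')
    (aux : List Char) (aux2 : List String) (M : List (List String)) (bol : Bool)
    (hinv : bol = false → aux = []) :
    obtainCSVvalues_step (aux, aux2, M, bol) c
      = ((parseRowStep (aux2, aux, bol) c).2.1, (parseRowStep (aux2, aux, bol) c).1, M,
         (parseRowStep (aux2, aux, bol) c).2.2) := by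
  by_cases hsemi : c = ';'
  · subst hsemi
    cases bol <;> simp [obtainCSVvalues_step, parseRowStep]
  · have hsemi' : c.toNat ≠ 59 := fun h => hsemi (char_toNat_inj h)
    by_cases hbs : c = '\\'
    · subst hbs
      cases bol with
      | false => have haux := hinv rfl; subst haux; simp [obtainCSVvalues_step, parseRowStep]
      | true => simp [obtainCSVvalues_step, parseRowStep]
    · have hbs' : c.toNat ≠ 92 := fun h => hbs (char_toNat_inj h)
      have hjoin : (if c.toNat = 44 then aux ++ [','] else aux ++ [c]) = aux ++ [c] := by
        split
        · next h44 => rw [show c = ',' from char_toNat_inj h44]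
        · rfl
      by_cases hup : 65 ≤ c.toNat ∧ c.toNat ≤ 90
      · have hup' : 'A' ≤ c ∧ c ≤ 'Z' := (upper_iff c).mpr hup
        simp only [obtainCSVvalues_step, parseRowStep]
        rw [hjoin]
        simp [hup.1, hup.2, hup'.1, hup'.2, hsemi, hsemi', hbs, hbs', hc]
      · have hup' : ¬ ('A' ≤ c ∧ c ≤ 'Z') := fun h => hup ((upper_iff c).mp h)
        cases bol with
        | false =>
          have haux := hinv rfl; subst haux
          simp [obtainCSVvalues_step, parseRowStep, hup, hup', hc]
        | true =>
          simp only [obtainCSVvalues_step, parseRowStep]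
          rw [hjoin]
          simp [hup, hup', hsemi, hsemi', hbs, hbs', hc]

theorem parseRowStep_inv (c : Char) (aux : List Char) (aux2 : List String) (bol : Bool)
    (hinv : bol = false → aux = []) :
    (parseRowStep (aux2, aux, bol) c).2.2 = false → (parseRowStep (aux2, aux, bol) c).2.1 = [] := by
  intro h
  simp only [parseRowStep] at h ⊢
  by_cases hup : 'A' ≤ c ∧ c ≤ 'Z'
  · rw [if_pos hup] at h ⊢
    by_cases hs : c = ';' <;> by_cases hb : c = '\\' <;> simp_all
  · rw [if_neg hup] at h ⊢
    cases bol with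
    | true => by_cases hs : c = ';' <;> by_cases hb : c = '\\' <;> simp_all
    | false => simpa using hinv rfl

-- A's fold, related to goB: M grows exactly by the rows goB emits
theorem foldA_eq_goB (cs : List Char) :
    ∀ (aux : List Char) (aux2 : List String) (M : List (List String)) (bol : Bool),
    (bol = false → aux = []) →
    (cs.foldl obtainCSVvalues_step (aux, aux2, M, bol)).2.2.1 = M ++ goB cs aux2 aux bol := by
  induction cs with
  | nil => intro aux aux2 M bol _; simp [goB]
  | cons c rest ih =>
    intro aux aux2 M bol hinv
    rw [List.foldl_cons]
    by_cases hc : c = '\r'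
    · subst hc
      have h1 : obtainCSVvalues_step (aux, aux2, M, bol) '\r'
          = ([], [], M ++ [aux2 ++ [String.ofList aux]], false) := by
        simp [obtainCSVvalues_step]
      rw [h1, ih [] [] _ false (fun _ => rfl)]
      simp [goB]
    · rw [stepA_eq_parseRowStep c hc aux aux2 M bol hinv,
          ih _ _ _ _ (parseRowStep_inv c aux aux2 bol hinv)]
      simp [goB, hc]

-- ===== VERDICT (by name: the statement is the Claim_ definition above) =====
theorem obtainCSVvalues_spec : Claim_equal_obtainCSVvalues := by
  intro pCSV _
  unfold Spec_obtainCSVvalues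
  rw [alt_eq_goB]
  have := foldA_eq_goB pCSV.toList [] [] [] false (fun _ => rfl)
  simpa [obtainCSVvalues] using this
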